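-- pv_equiv track=rewrite | github.com/HongruCai/AVG | analyze_code.py | retrieval_by_inersection
-- ===== SOURCE A (Python) =====
-- def retrieval_by_inersection(code, queries, top_k=50):
--     distances = []
--     for img in queries.keys():
--         query = queries[img]
--         distance = set(code).intersection(set(query))
--         distances.append((img, query,len(distance)))
--     distances.sort(key=lambda x: (-x[2], x[0]))
--
--     # Adjust ranking to handle ties correctly
--     ranked_results = []
--     current_rank = 1
--     last_distance = None
--     for idx, (img, query, distance) in enumerate(distances, start=1):
--         if distance != last_distance:
--             current_rank = idx
--         ranked_results.append((img, query, distance, current_rank))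
--         last_distance = distance
--
--     return ranked_results[:top_k]
-- ===== SOURCE B (Python) =====
-- def retrieval_by_inersection(code, queries, top_k=50):
--     # Bucket the queries by intersection size, then emit buckets from the
--     # largest size down; the competition rank of a bucket is simply the
--     # number of items already emitted plus one.
--     code_set = set(code)
--     buckets = {}
--     for img, query in queries.items():
--         d = len(code_set.intersection(set(query)))
--         buckets.setdefault(d, []).append((img, query))
--     ranked = []
--     for d in sorted(buckets, reverse=True):
--         rank = len(ranked) + 1
--         for img, query in sorted(buckets[d], key=lambda p: p[0]):
--             ranked.append((img, query, d, rank))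
--     return ranked[:top_k]
-- ===== Notes on version B (the rewrite author's own statement) =====
-- stated objective: faster
-- what changed: Instead of A's global sort of all (img, query, size) triples by (-size, img) followed by a stateful scan tracking last_distance/current_rank, B groups the queries into buckets keyed by intersection size, sorts only the distinct sizes (descending) and each bucket by img, and emits bucket after bucket with rank = items already emitted + 1; set(code) is built once instead of once per query.
import Mathlib
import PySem

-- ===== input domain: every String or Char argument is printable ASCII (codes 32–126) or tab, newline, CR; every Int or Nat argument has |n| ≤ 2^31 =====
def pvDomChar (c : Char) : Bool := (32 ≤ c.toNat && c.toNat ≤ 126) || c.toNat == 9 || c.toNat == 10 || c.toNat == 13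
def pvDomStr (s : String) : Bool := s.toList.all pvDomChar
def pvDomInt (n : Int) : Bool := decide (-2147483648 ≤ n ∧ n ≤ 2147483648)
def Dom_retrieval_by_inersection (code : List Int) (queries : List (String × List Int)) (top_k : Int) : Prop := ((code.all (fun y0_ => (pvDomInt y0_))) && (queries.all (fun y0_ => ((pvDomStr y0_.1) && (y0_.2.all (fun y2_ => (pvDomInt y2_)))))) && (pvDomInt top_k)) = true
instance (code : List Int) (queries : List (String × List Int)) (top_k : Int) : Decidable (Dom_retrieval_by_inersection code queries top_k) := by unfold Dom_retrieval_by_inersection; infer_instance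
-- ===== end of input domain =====

-- B replaces A's global (-size, img) comparison sort plus the stateful rank scan
-- (last_distance/current_rank) by grouping the queries into buckets keyed by intersection
-- size, then emitting the buckets from the largest size down with rank = items emitted so
-- far + 1; set(code) is built once instead of once per query. Same results.

-- ===== PORT A =====
def retrieval_by_inersection (code : List Int) (queries : List (String × List Int)) (top_k : Int) : List (String × List Int × Int × Int) :=
  -- 'queries' is a Python dict: decode the association list with dict semantics
  -- (insertion order of first occurrence, later duplicate keys overwrite in place)
  let qd : PySem.Dict String (List Int) := queries.foldl (fun d p => d.insert p.1 p.2) PySem.Dict.empty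
  -- for img in queries.keys(): query = queries[img]; distances.append(...)
  let distances : List (String × List Int × Int) :=
    qd.keys.foldl (fun acc img =>
      let query := (qd.get? img).getD []   -- queries[img]: img ∈ keys, so the lookup cannot fail
      acc ++ [(img, query, ((PySem.Set.inter (PySem.Set.ofList code) (PySem.Set.ofList query)).length : Int))]) []
  -- distances.sort(key=lambda x: (-x[2], x[0]))
  let distances := PySem.List.sorted2 distances (fun x => -x.2.2) (fun x => x.1)
  -- for idx, (img, query, distance) in enumerate(distances, start=1): ...
  let st := (PySem.List.enumerate distances 1).foldl
    (fun (st : Int × Option Int × List (String × List Int × Int × Int)) p =>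
      let current_rank := if some p.2.2.2 ≠ st.2.1 then p.1 else st.1
      (current_rank, some p.2.2.2, st.2.2 ++ [(p.2.1, p.2.2.1, p.2.2.2, current_rank)]))
    (1, none, [])
  PySem.List.slice st.2.2 none (some top_k)

-- ===== PORT B =====
def retrieval_by_inersection_alt (code : List Int) (queries : List (String × List Int)) (top_k : Int) : List (String × List Int × Int × Int) :=
  let qd : PySem.Dict String (List Int) := queries.foldl (fun d p => d.insert p.1 p.2) PySem.Dict.empty
  let code_set := PySem.Set.ofList code
  -- buckets.setdefault(d, []).append((img, query))  =  buckets[d] = buckets.get(d, []) + [(img, query)]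
  let buckets : PySem.Dict Int (List (String × List Int)) :=
    qd.items.foldl (fun b p =>
      b.modify ((PySem.Set.inter code_set (PySem.Set.ofList p.2)).length : Int) []
        (fun l => l ++ [(p.1, p.2)])) PySem.Dict.empty
  -- for d in sorted(buckets, reverse=True): rank = len(ranked)+1; emit sorted bucket
  let ranked := (PySem.List.sorted buckets.keys (fun d => d) true).foldl
    (fun ranked d =>
      let rank : Int := (ranked.length : Int) + 1
      ranked ++ (PySem.List.sorted (buckets.getD d []) (fun p => p.1)).map
        (fun p => (p.1, p.2, d, rank))) []
  PySem.List.slice ranked none (some top_k)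

-- ===== PRECONDITION & SPEC =====
def Spec_retrieval_by_inersection (code : List Int) (queries : List (String × List Int)) (top_k : Int) (out : List (String × List Int × Int × Int)) : Prop := out = retrieval_by_inersection_alt code queries top_k
instance (code : List Int) (queries : List (String × List Int)) (top_k : Int) (out : List (String × List Int × Int × Int)) : Decidable (Spec_retrieval_by_inersection code queries top_k out) := by unfold Spec_retrieval_by_inersection; infer_instance

-- ===== CLAIM (what is proved, stated in full; the proofs are below) =====
def Claim_equal_retrieval_by_inersection : Prop := ∀ (code : List Int) (queries : List (String × List Int)) (top_k : Int), Dom_retrieval_by_inersection code queries top_k → Spec_retrieval_by_inersection code queries top_k (retrieval_by_inersection code queries top_k)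

-- ===== LEMMAS AND PROOFS =====

-- the strict order in which both programs lay the results out:
-- larger intersection first, ties by image name
def pvLess (a b : String × List Int × Int) : Prop :=
  b.2.2 < a.2.2 ∨ (a.2.2 = b.2.2 ∧ a.1 < b.1)

lemma pv_insertBy_pairwise {α : Type} (R : α → α → Prop) (before : α → α → Bool)
    (htr : ∀ a b c, R a b → R b c → R a c)
    (hb : ∀ a b, before a b = true → R a b) (hnb : ∀ a b, before a b = false → R b a)
    (x : α) : ∀ l : List α, l.Pairwise R → (PySem.List.insertBy before x l).Pairwise R := by
  intro l
  induction l with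
  | nil => intro _; simp [PySem.List.insertBy]
  | cons y ys ih =>
    intro h
    rw [List.pairwise_cons] at h
    obtain ⟨hy, hys⟩ := h
    show (if before x y then x :: y :: ys else y :: PySem.List.insertBy before x ys).Pairwise R
    by_cases hby : before x y = true
    · simp only [hby, if_true]
      refine List.Pairwise.cons ?_ (List.Pairwise.cons hy hys)
      intro z hz
      rcases List.mem_cons.mp hz with rfl | hz
      · exact hb _ _ hby
      · exact htr _ _ _ (hb _ _ hby) (hy _ hz)
    · simp only [hby]
      refine List.Pairwise.cons ?_ (ih hys)
      intro z hz
      rcases (PySem.List.mem_insertBy before x z ys).mp hz with rfl | hz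
      · exact hnb _ _ (Bool.eq_false_iff.mpr hby)
      · exact hy _ hz

lemma pv_foldl_insertBy_pairwise {α : Type} (R : α → α → Prop) (before : α → α → Bool)
    (htr : ∀ a b c, R a b → R b c → R a c)
    (hb : ∀ a b, before a b = true → R a b) (hnb : ∀ a b, before a b = false → R b a) :
    ∀ (xs acc : List α), acc.Pairwise R →
      (xs.foldl (fun acc x => PySem.List.insertBy before x acc) acc).Pairwise R := by
  intro xs
  induction xs with
  | nil => intro acc h; exact h
  | cons x xs ih =>
    intro acc h
    exact ih _ (pv_insertBy_pairwise R before htr hb hnb x acc h)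

-- A's sorted2 (key (-distance, img)) is pairwise weakly ordered
lemma pv_sorted2_pairwise (xs : List (String × List Int × Int)) :
    (PySem.List.sorted2 xs (fun x => -x.2.2) (fun x => x.1) false).Pairwise
      (fun a b => b.2.2 < a.2.2 ∨ (a.2.2 = b.2.2 ∧ a.1 ≤ b.1)) := by
  have hdef : PySem.List.sorted2 xs (fun x => -x.2.2) (fun x => x.1) false =
      xs.foldl (fun acc x => PySem.List.insertBy
        (fun a b => decide (-a.2.2 < -b.2.2) || (!decide (-b.2.2 < -a.2.2) && decide (a.1 < b.1))) x acc) [] := rfl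
  rw [hdef]
  apply pv_foldl_insertBy_pairwise
  · intro a b c h1 h2
    rcases h1 with h1 | ⟨h1, h1'⟩ <;> rcases h2 with h2 | ⟨h2, h2'⟩
    · left; omega
    · left; omega
    · left; omega
    · right; exact ⟨by omega, le_trans h1' h2'⟩
  · intro a b h
    simp only [Bool.or_eq_true, Bool.and_eq_true, Bool.not_eq_true', decide_eq_true_eq,
      decide_eq_false_iff_not] at h
    rcases h with h | ⟨h, h'⟩
    · left; omega
    · by_cases hd : b.2.2 < a.2.2
      · left; exact hd
      · right; exact ⟨by omega, le_of_lt h'⟩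
  · intro a b h
    simp only [Bool.or_eq_false_iff, Bool.and_eq_false_iff, Bool.not_eq_false',
      decide_eq_true_eq, decide_eq_false_iff_not] at h
    obtain ⟨h1, h2⟩ := h
    rcases h2 with h2 | h2
    · left; omega
    · by_cases hd : a.2.2 < b.2.2
      · left; exact hd
      · right; exact ⟨by omega, le_of_not_gt h2⟩
  · exact List.Pairwise.nil

-- B's descending key sort is pairwise weakly decreasing
lemma pv_sorted_rev_pairwise (xs : List Int) :
    (PySem.List.sorted xs (fun d => d) true).Pairwise (fun a b => b ≤ a) := by
  rw [PySem.List.sorted_rev_eq_foldl_insertBy]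
  apply pv_foldl_insertBy_pairwise
  · intro a b c h1 h2; omega
  · intro a b h; simp only [decide_eq_true_eq] at h; omega
  · intro a b h; simp only [decide_eq_false_iff_not] at h; omega
  · exact List.Pairwise.nil

-- two permuted lists, both pairwise-sorted by an asymmetric relation, are equal
lemma pv_eq_of_perm_of_pairwise {α : Type} (S : α → α → Prop)
    (hasymm : ∀ a b, S a b → S b a → False) :
    ∀ (l1 l2 : List α), l1.Perm l2 → l1.Pairwise S → l2.Pairwise S → l1 = l2 := by
  intro l1
  induction l1 with
  | nil => intro l2 hp _ _; exact hp.nil_eq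
  | cons x t1 ih =>
    intro l2 hp h1 h2
    cases l2 with
    | nil => exact (List.cons_ne_nil x t1 hp.eq_nil).elim
    | cons y t2 =>
      rw [List.pairwise_cons] at h1 h2
      by_cases hxy : x = y
      · subst hxy
        rw [ih t2 (hp.cons_inv) h1.2 h2.2]
      · exfalso
        have hx2 : x ∈ y :: t2 := hp.mem_iff.mp List.mem_cons_self
        have hy1 : y ∈ x :: t1 := hp.mem_iff.mpr List.mem_cons_self
        have hxt2 : x ∈ t2 := by rcases List.mem_cons.mp hx2 with h | h; exact absurd h hxy; exact h
        have hyt1 : y ∈ t1 := by rcases List.mem_cons.mp hy1 with h | h; exact absurd h.symm hxy; exact h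
        exact hasymm x y (h1.1 y hyt1) (h2.1 x hxt2)

-- pointwise-permuted blocks give permuted flatMaps
lemma pv_flatMap_perm {α β : Type} (K : List α) (f g : α → List β)
    (h : ∀ d ∈ K, (f d).Perm (g d)) : (K.flatMap f).Perm (K.flatMap g) := by
  induction K with
  | nil => rfl
  | cons d K ih =>
    simp only [List.flatMap_cons]
    exact (h d List.mem_cons_self).append (ih (fun d' hd' => h d' (List.mem_cons_of_mem d hd')))

-- distinct bucket keys covering every item: concatenating the buckets permutes the items
lemma pv_partition_perm {β : Type} (key : β → Int) :
    ∀ (ds : List Int) (l : List β), ds.Nodup → (∀ x ∈ l, key x ∈ ds) →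
      (ds.flatMap (fun d => l.filter (fun x => key x == d))).Perm l := by
  intro ds
  induction ds with
  | nil =>
    intro l _ hcov
    have : l = [] := by
      cases l with
      | nil => rfl
      | cons a t => exact absurd (hcov a List.mem_cons_self) (List.not_mem_nil)
    simp [this]
  | cons d ds ih =>
    intro l hnd hcov
    rw [List.nodup_cons] at hnd
    simp only [List.flatMap_cons]
    have hrest : ds.flatMap (fun d' => l.filter (fun x => key x == d')) =
        ds.flatMap (fun d' => (l.filter (fun x => !(key x == d))).filter (fun x => key x == d')) := by
      apply List.flatMap_congr
      intro d' hd'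
      rw [List.filter_filter]
      apply List.filter_congr
      intro x _
      by_cases h : key x == d'
      · have : ¬ (key x == d) = true := by
          simp only [beq_iff_eq] at h ⊢
          rw [h]; intro hdd; exact hnd.1 (hdd ▸ hd')
        simp [h, Bool.eq_false_iff.mpr this]
      · simp [Bool.eq_false_iff.mpr h]
    rw [hrest]
    have hih := ih (l.filter (fun x => !(key x == d))) hnd.2 (by
      intro x hx
      rw [List.mem_filter] at hx
      have := hcov x hx.1
      rcases List.mem_cons.mp this with h | h
      · exfalso; simp [h] at hx
      · exact h)
    exact List.Perm.trans (List.Perm.append_left _ hih) (List.filter_append_perm _ l)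

-- A's scan over a constant-distance run keeps the current rank
lemma pv_scan_const (d : Int) :
    ∀ (xs : List (String × List Int)) (i cur : Int)
      (acc : List (String × List Int × Int × Int)),
      ((PySem.List.enumerate (xs.map (fun p => (p.1, p.2, d))) i).foldl
        (fun (st : Int × Option Int × List (String × List Int × Int × Int)) p =>
          (if some p.2.2.2 ≠ st.2.1 then p.1 else st.1, some p.2.2.2,
           st.2.2 ++ [(p.2.1, p.2.2.1, p.2.2.2, if some p.2.2.2 ≠ st.2.1 then p.1 else st.1)]))
        (cur, some d, acc))
      = (cur, some d, acc ++ xs.map (fun p => (p.1, p.2, d, cur))) := by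
  intro xs
  induction xs with
  | nil => intro i cur acc; simp [PySem.List.enumerate_nil]
  | cons x xs ih =>
    intro i cur acc
    rw [List.map_cons, PySem.List.enumerate_cons, List.foldl_cons]
    simp only [ne_eq, not_true_eq_false, if_false]
    rw [ih]
    simp

-- A's scan over strictly-decreasing nonempty blocks = B's bucket-emitting fold
lemma pv_scan_blocks :
    ∀ (K : List Int) (g : Int → List (String × List Int)) (cur : Int) (last : Option Int)
      (acc : List (String × List Int × Int × Int)),
      K.Pairwise (fun a b => b < a) →
      (∀ d ∈ K, g d ≠ []) →
      (∀ d ∈ K, ∀ L, last = some L → d < L) →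
      ((PySem.List.enumerate (K.flatMap (fun d => (g d).map (fun p => (p.1, p.2, d))))
          ((acc.length : Int) + 1)).foldl
        (fun (st : Int × Option Int × List (String × List Int × Int × Int)) p =>
          (if some p.2.2.2 ≠ st.2.1 then p.1 else st.1, some p.2.2.2,
           st.2.2 ++ [(p.2.1, p.2.2.1, p.2.2.2, if some p.2.2.2 ≠ st.2.1 then p.1 else st.1)]))
        (cur, last, acc)).2.2
      = K.foldl (fun r d => r ++ (g d).map (fun p => (p.1, p.2, d, (r.length : Int) + 1))) acc := by
  intro K
  induction K with
  | nil => intro g cur last acc _ _ _; simp [PySem.List.enumerate_nil]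
  | cons d K ih =>
    intro g cur last acc hpw hne hlast
    rw [List.pairwise_cons] at hpw
    obtain ⟨hd, hpwK⟩ := hpw
    rw [List.flatMap_cons, PySem.List.enumerate_append, List.foldl_append]
    -- head block is nonempty
    obtain ⟨x, xs, hgx⟩ : ∃ x xs, g d = x :: xs := by
      cases hgd : g d with
      | nil => exact absurd hgd (hne d List.mem_cons_self)
      | cons x xs => exact ⟨x, xs, rfl⟩
    -- first element of the block resets the rank to acc.length + 1
    have hcond : some d ≠ last := by
      cases last with
      | none => simp
      | some L => have := hlast d List.mem_cons_self L rfl; simp; omega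
    rw [hgx, List.map_cons, PySem.List.enumerate_cons, List.foldl_cons]
    rw [if_pos hcond]
    rw [pv_scan_const]
    rw [List.foldl_cons]
    simp only [List.singleton_append, List.append_assoc, List.length_cons, List.length_map,
      Nat.cast_add, Nat.cast_one, hgx, List.map_cons]
    have hidx : ((acc.length : Int) + 1 + ((xs.length : Int) + 1) : Int)
        = ((((acc ++ (x.1, x.2, d, (acc.length : Int) + 1) :: List.map (fun p => (p.1, p.2, d, (acc.length : Int) + 1)) xs).length : Int)) + 1 : Int) := by
      simp; ring
    rw [hidx, ih g ((acc.length : Int) + 1) (some d) _ hpwK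
      (fun d' hd' => hne d' (List.mem_cons_of_mem d hd'))
      (fun d' hd' L hL => by injection hL with hL; exact hL ▸ hd d' hd')]

-- ===== VERDICT (by name: the statement is the Claim_ definition above) =====
theorem retrieval_by_inersection_spec : Claim_equal_retrieval_by_inersection := by
  intro code queries top_k _
  unfold Spec_retrieval_by_inersection
  simp only [retrieval_by_inersection, retrieval_by_inersection_alt]
  set qd : PySem.Dict String (List Int) :=
    queries.foldl (fun d p => d.insert p.1 p.2) PySem.Dict.empty with hqd
  have hnd : qd.keys.Nodup := by
    rw [hqd]
    exact PySem.Dict.nodup_keys_foldl_insert_key queries (fun p => p.1) (fun _ p => p.2)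
      PySem.Dict.empty PySem.Dict.nodup_keys_empty
  -- A's first loop builds the items list tagged with the intersection sizes
  have hdist :
      (qd.keys.foldl (fun acc img =>
        acc ++ [(img, (qd.get? img).getD [],
          ((PySem.Set.inter (PySem.Set.ofList code) (PySem.Set.ofList ((qd.get? img).getD []))).length : Int))]) [])
      = qd.items.map (fun p => (p.1, p.2, ((PySem.Set.inter (PySem.Set.ofList code) (PySem.Set.ofList p.2)).length : Int))) := by
    rw [PySem.List.foldl_append_singleton_eq_map (f := fun img =>
      (img, (qd.get? img).getD [],
        ((PySem.Set.inter (PySem.Set.ofList code) (PySem.Set.ofList ((qd.get? img).getD []))).length : Int)))]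
    rw [PySem.Dict.items_eq_map_keys qd hnd [], List.map_map]
    simp only [List.nil_append]
    apply List.map_congr_left
    intro img _
    have hg : qd.getD img [] = (qd.get? img).getD [] := PySem.Dict.getD_eq_get?_getD qd img []
    simp only [Function.comp_apply, ← hg]
  rw [hdist]
  -- abbreviations
  set dist : (String × List Int) → Int :=
    fun p => ((PySem.Set.inter (PySem.Set.ofList code) (PySem.Set.ofList p.2)).length : Int) with hdistf
  set bk : PySem.Dict Int (List (String × List Int)) :=
    qd.items.foldl (fun b p => b.modify (dist p) [] (fun l => l ++ [(p.1, p.2)])) PySem.Dict.empty with hbk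
  set t : List (String × List Int × Int) := qd.items.map (fun p => (p.1, p.2, dist p)) with ht
  set K : List Int := PySem.List.sorted bk.keys (fun d => d) true with hK
  set g : Int → List (String × List Int) :=
    fun dd => PySem.List.sorted (bk.getD dd []) (fun p => p.1) with hgdef
  -- the buckets dict: keys and contents
  have hfold : bk = (qd.items.map (fun p => (dist p, (p.1, p.2)))).foldl
      (fun b q => b.modify q.1 [] (fun l => l ++ [q.2])) PySem.Dict.empty := by
    rw [hbk, List.foldl_map]
  have hkeys : bk.keys = PySem.Set.ofList (qd.items.map dist) := by
    rw [hbk, PySem.Dict.keys_foldl_modify_key qd.items dist [] (fun _ p => fun l => l ++ [(p.1, p.2)])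
      PySem.Dict.empty, PySem.Dict.keys_empty, PySem.Set.update_nil_left]
  have hbucket : ∀ dd : Int, bk.getD dd [] = qd.items.filter (fun p => dist p == dd) := by
    intro dd
    rw [hfold, PySem.Dict.getD_foldl_modify_append, PySem.Dict.getD_empty, List.nil_append,
      List.filter_map, List.map_map]
    simp [Function.comp_def]
  -- the sorted key list
  have hKperm : K.Perm bk.keys := PySem.List.sorted_perm bk.keys (fun d => d) true
  have hKnodup : K.Nodup := hKperm.symm.nodup (hkeys ▸ PySem.Set.nodup_ofList (qd.items.map dist))
  have hKmem : ∀ p ∈ qd.items, dist p ∈ K := by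
    intro p hp
    rw [hKperm.mem_iff, hkeys, PySem.Set.mem_ofList]
    exact List.mem_map_of_mem hp
  have hKs : K.Pairwise (fun a b => b < a) := by
    have hw := pv_sorted_rev_pairwise bk.keys
    rw [← hK] at hw
    exact (hw.and hKnodup).imp (fun h => lt_of_le_of_ne h.1 (Ne.symm h.2))
  -- nodup of the image names
  have hqknd : (qd.items.map (fun p => p.1)).Nodup := by
    simpa [PySem.Dict.keys] using hnd
  -- B's flattened bucket output
  set F : List (String × List Int × Int) :=
    K.flatMap (fun dd => (g dd).map (fun p => (p.1, p.2, dd))) with hF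
  have hFt : F.Perm t := by
    refine List.Perm.trans (pv_flatMap_perm K _
      (fun dd => (qd.items.filter (fun p => dist p == dd)).map (fun p => (p.1, p.2, dd)))
      (fun dd _ => List.Perm.map _
        ((PySem.List.sorted_perm (bk.getD dd []) (fun p => p.1) false).trans
          (by rw [hbucket dd])))) ?_
    have hcongr : K.flatMap (fun dd => (qd.items.filter (fun p => dist p == dd)).map (fun p => (p.1, p.2, dd)))
        = (K.flatMap (fun dd => qd.items.filter (fun p => dist p == dd))).map (fun p => (p.1, p.2, dist p)) := by
      rw [List.map_flatMap]
      apply List.flatMap_congr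
      intro dd _
      apply List.map_congr_left
      intro p hp
      have h2 := (List.mem_filter.mp hp).2
      simp only [beq_iff_eq] at h2
      rw [h2]
    rw [hcongr, ht]
    exact (pv_partition_perm dist K qd.items hKnodup hKmem).map _
  -- A's sorted list
  set s : List (String × List Int × Int) :=
    PySem.List.sorted2 t (fun x => -x.2.2) (fun x => x.1) with hs
  have hsperm : s.Perm t := PySem.List.sorted2_perm t (fun x => -x.2.2) (fun x => x.1) false
  have htfstnd : (t.map (fun x => x.1)).Nodup := by
    rw [ht, List.map_map]
    exact hqknd
  have hsfstnd : (s.map (fun x => x.1)).Nodup := ((hsperm.map (fun x => x.1)).symm).nodup htfstnd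
  have hsS : s.Pairwise pvLess := by
    have hw := pv_sorted2_pairwise t
    rw [← hs] at hw
    have hne : s.Pairwise (fun a b => a.1 ≠ b.1) := List.pairwise_map.mp hsfstnd
    refine (hw.and hne).imp ?_
    intro a b h
    rcases h.1 with h1 | ⟨h1, h1'⟩
    · exact Or.inl h1
    · exact Or.inr ⟨h1, lt_of_le_of_ne h1' h.2⟩
  -- B's flattened output is pairwise-ordered too
  have hFS : F.Pairwise pvLess := by
    rw [hF, List.pairwise_flatMap]
    constructor
    · intro dd _
      rw [List.pairwise_map]
      have hsorted := PySem.List.sorted_pairwise (bk.getD dd []) (fun p => p.1)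
      have hbnd : ((bk.getD dd []).map (fun p => p.1)).Nodup := by
        rw [hbucket dd]
        exact List.Nodup.sublist (List.Sublist.map _ List.filter_sublist) hqknd
      have hgnd : (((PySem.List.sorted (bk.getD dd []) fun p => p.1)).map (fun p => p.1)).Nodup :=
        (((PySem.List.sorted_perm (bk.getD dd []) (fun p => p.1) false).map _).symm).nodup hbnd
      have hne := List.pairwise_map.mp hgnd
      exact (hsorted.and hne).imp (fun h => Or.inr ⟨rfl, lt_of_le_of_ne h.1 h.2⟩)
    · refine hKs.imp ?_
      intro d1 d2 h x hx y hy
      obtain ⟨p, _, rfl⟩ := List.mem_map.mp hx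
      obtain ⟨q, _, rfl⟩ := List.mem_map.mp hy
      exact Or.inl h
  -- hence A scans exactly B's flattened list
  have hasymm : ∀ a b : String × List Int × Int, pvLess a b → pvLess b a → False := by
    intro a b h1 h2
    rcases h1 with h1 | ⟨hd1, h1⟩ <;> rcases h2 with h2 | ⟨hd2, h2⟩
    · omega
    · omega
    · omega
    · exact lt_asymm h1 h2
  have hsF : s = F := pv_eq_of_perm_of_pairwise pvLess hasymm s F (hsperm.trans hFt.symm) hsS hFS
  -- the nonempty-bucket condition
  have hgne : ∀ dd ∈ K, g dd ≠ [] := by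
    intro dd hdd
    rw [hgdef, Ne, PySem.List.sorted_eq_nil_iff, hbucket dd]
    intro hemp
    have hdd' : dd ∈ qd.items.map dist := by
      have hmem := hKperm.mem_iff.mp hdd
      rw [hkeys] at hmem
      exact (PySem.Set.mem_ofList _ _).mp hmem
    obtain ⟨p, hp, rfl⟩ := List.mem_map.mp hdd'
    have hpin : p ∈ qd.items.filter (fun q => dist q == dist p) :=
      List.mem_filter.mpr ⟨hp, by simp⟩
    rw [hemp] at hpin
    exact List.not_mem_nil hpin
  -- apply the scan/blocks correspondence
  have hscan := pv_scan_blocks K g 1 none [] hKs hgne (by intro d _ L h; cases h)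
  simp only [List.length_nil, Nat.cast_zero, zero_add] at hscan
  rw [← hF, ← hsF] at hscan
  rw [hscan]
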